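-- pv_equiv track=rewrite | github.com/haltosan/RA-python-tools | file_analysis.py | csvColumn
-- ===== SOURCE A (Python) =====
-- def csvSplit(text):
--     """converts csv string to list"""
--     texts = []
--     curString = ""
--     inString = False
--     for char in text:
--         if char == '"':
--             inString = not inString
--         if char == ',' and not inString:
--             texts.append(curString)
--             curString = ""
--         elif char != '"':  # TODO: figure out how to remove only the quotes that escape stuff, not literal quotes
--             curString += str(char)
--     texts.append(curString)
--     return texts
--
-- def csvColumn(texts, n, safe=True):
--     """return a column from a csv file"""
--     outl = list()
--     for i in texts:
--         try:
--             outl.append(clean(csvSplit(i)[n], ['"']))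
--         except IndexError:
--             if safe:
--                 outl.append('')
--             else:
--                 raise IndexError("Index " + str(n) + " out of range for texts")
--     return outl
--
-- def clean(text, rems=None, negate=False):
--     """removes rems text from text/texts"""
--     if rems is None:
--         rems = [' ', ',', '"']
--     if type(text) is str:
--         if not negate:
--             for r in rems:
--                 text = text.replace(r, '')
--         else:
--             newText = ''
--             for i in text:
--                 if i in rems:
--                     newText += i
--             text = newText
--     elif type(text) is list:
--         out = list()
--         for i in text:
--             line = i
--             for r in rems:
--                 line = line.replace(r, '')
--             out.append(line)
--         text = out
--     return text
-- ===== SOURCE B (Python) =====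
-- def csvColumn(texts, n, safe=True):
--     """return a column from a csv file (single-pass field extraction, no full split)"""
--     out = []
--     for line in texts:
--         # pass 1: count fields (unquoted commas + 1)
--         in_s = False
--         count = 1
--         for c in line:
--             if c == '"':
--                 in_s = not in_s
--             elif c == ',' and not in_s:
--                 count += 1
--         idx = n + count if n < 0 else n
--         if 0 <= idx < count:
--             # pass 2: collect only field idx, dropping every quote char
--             in_s = False
--             k = 0
--             buf = []
--             for c in line:
--                 if c == '"':
--                     in_s = not in_s
--                 elif c == ',' and not in_s:
--                     k += 1
--                     if k > idx:
--                         break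
--                 elif k == idx:
--                     buf.append(c)
--             out.append(''.join(buf))
--         elif safe:
--             out.append('')
--         else:
--             raise IndexError("Index " + str(n) + " out of range for texts")
--     return out
-- ===== Notes on version B (the rewrite author's own statement) =====
-- stated objective: alternative
-- what changed: Instead of splitting every line into a full field list with csvSplit, indexing it and cleaning the field, B scans each line twice in place: one pass counts unquoted commas to resolve the (possibly negative) index, a second pass collects only the characters of the target field, so no intermediate list of fields is ever built.
import Mathlib
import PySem

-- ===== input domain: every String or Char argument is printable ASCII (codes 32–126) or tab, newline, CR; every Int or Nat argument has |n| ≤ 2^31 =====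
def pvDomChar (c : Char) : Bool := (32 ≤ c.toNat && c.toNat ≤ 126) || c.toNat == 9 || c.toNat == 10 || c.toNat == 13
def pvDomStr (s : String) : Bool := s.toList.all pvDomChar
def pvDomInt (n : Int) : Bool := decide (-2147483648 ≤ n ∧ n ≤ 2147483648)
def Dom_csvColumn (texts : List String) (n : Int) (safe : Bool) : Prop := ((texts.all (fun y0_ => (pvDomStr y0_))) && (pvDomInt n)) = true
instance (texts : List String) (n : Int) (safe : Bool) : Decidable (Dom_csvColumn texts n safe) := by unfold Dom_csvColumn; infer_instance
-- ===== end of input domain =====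

-- B extracts each line's n-th field with two in-place character scans (count fields, then collect
-- only the target field) instead of building the full field list with csvSplit and cleaning; alternative decomposition, same cost.


-- ===== PORT A =====
-- csvSplit's loop: fields are built as List Char; the final String.ofList happens where A uses the field.
def pvSplitGo : List Char → List Char → Bool → List (List Char)
  | [], cur, _ => [cur]
  | c :: cs, cur, inS =>
    if c = '"' then pvSplitGo cs cur (!inS)
    else if c = ',' ∧ inS = false then cur :: pvSplitGo cs [] inS
    else pvSplitGo cs (cur ++ [c]) inS

-- clean(text, ['"']) for a str argument: for r in rems: text = text.replace(r, '')
def pvClean (s : String) : String := ["\""].foldl (fun text r => PySem.Str.replace text r "") s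

def csvColumn : List String → Int → Bool → List String
  | [], _, _ => []
  | t :: ts, n, safe =>
    match PySem.List.pyGet? (pvSplitGo t.toList [] false) n with
    | some f => pvClean (String.ofList f) :: csvColumn ts n safe
    | none =>
      if safe then "" :: csvColumn ts n safe
      else []  -- Python raises IndexError here; excluded by Pre_csvColumn

-- ===== PORT B =====
-- pass 1 of Source B: count unquoted commas + 1
def pvCountGo : List Char → Bool → Nat
  | [], _ => 1
  | c :: cs, inS =>
    if c = '"' then pvCountGo cs (!inS)
    else if c = ',' ∧ inS = false then 1 + pvCountGo cs inS
    else pvCountGo cs inS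

-- pass 2 of Source B: collect the characters of field idx, dropping quotes, stopping after it
def pvPickGo : List Char → Bool → Nat → Nat → List Char
  | [], _, _, _ => []
  | c :: cs, inS, k, idx =>
    if c = '"' then pvPickGo cs (!inS) k idx
    else if c = ',' ∧ inS = false then
      if idx < k + 1 then [] else pvPickGo cs inS (k + 1) idx
    else if k = idx then c :: pvPickGo cs inS k idx
    else pvPickGo cs inS k idx

def csvColumn_alt : List String → Int → Bool → List String
  | [], _, _ => []
  | t :: ts, n, safe =>
    let cnt : Int := (pvCountGo t.toList false : Int)
    let idx : Int := if n < 0 then n + cnt else n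
    if 0 ≤ idx ∧ idx < cnt then
      String.ofList (pvPickGo t.toList false 0 idx.toNat) :: csvColumn_alt ts n safe
    else if safe then "" :: csvColumn_alt ts n safe
    else []  -- Source B raises IndexError here; excluded by Pre_csvColumn

-- ===== PRECONDITION & SPEC =====
-- number of csv fields of a line (unquoted commas + 1); used only to state Pre_
def pvNumFields (s : String) : Int :=
  ((s.toList.foldl (fun st c =>
      if c = '"' then (st.1, !st.2)
      else if c = ',' ∧ st.2 = false then (st.1 + 1, st.2)
      else st) ((1 : Nat), false)).1 : Int)

-- Pre_ excludes exactly the inputs where A raises IndexError: safe = false and some line has fewer fields than index n requires.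
def Pre_csvColumn (texts : List String) (n : Int) (safe : Bool) : Prop :=
  safe = true ∨ ∀ t ∈ texts, -(pvNumFields t) ≤ n ∧ n < pvNumFields t
instance (texts : List String) (n : Int) (safe : Bool) : Decidable (Pre_csvColumn texts n safe) := by
  unfold Pre_csvColumn; infer_instance

def pvWitness_csvColumn : List String × Int × Bool := (["a,b", "\"x,y\",z"], 1, false)

def Spec_csvColumn (texts : List String) (n : Int) (safe : Bool) (out : List String) : Prop := out = csvColumn_alt texts n safe
instance (texts : List String) (n : Int) (safe : Bool) (out : List String) : Decidable (Spec_csvColumn texts n safe out) := by unfold Spec_csvColumn; infer_instance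

-- ===== CLAIM (what is proved, stated in full; the proofs are below) =====
def Claim_equal_csvColumn : Prop := ∀ (texts : List String) (n : Int) (safe : Bool), Dom_csvColumn texts n safe → Pre_csvColumn texts n safe → Spec_csvColumn texts n safe (csvColumn texts n safe)

-- ===== LEMMAS AND PROOFS =====

-- the field count of pass 1 is the length of csvSplit's field list
lemma pv_count_eq_length : ∀ (cs cur : List Char) (inS : Bool),
    (pvSplitGo cs cur inS).length = pvCountGo cs inS := by
  intro cs
  induction cs with
  | nil => intro cur inS; simp [pvSplitGo, pvCountGo]
  | cons c cs ih =>
    intro cur inS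
    by_cases h1 : c = '"'
    · simp [pvSplitGo, pvCountGo, h1, ih]
    · by_cases h2 : c = ',' ∧ inS = false
      · simp [pvSplitGo, pvCountGo, h2, ih]; omega
      · simp [pvSplitGo, pvCountGo, h1, h2, ih]

-- the foldl in pvNumFields computes pvCountGo
lemma pv_numFields_go : ∀ (cs : List Char) (k : Nat) (inS : Bool),
    (cs.foldl (fun st c =>
      if c = '"' then (st.1, !st.2)
      else if c = ',' ∧ st.2 = false then (st.1 + 1, st.2)
      else st) (k, inS)).1 = k + pvCountGo cs inS - 1 := by
  intro cs
  induction cs with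
  | nil => intro k inS; simp [pvCountGo]
  | cons c cs ih =>
    intro k inS
    by_cases h1 : c = '"'
    · simp [pvCountGo, h1, ih]
    · by_cases h2 : c = ',' ∧ inS = false
      · simp [pvCountGo, h2, ih]; omega
      · simp [pvCountGo, h1, h2, ih]

lemma pv_numFields_eq (s : String) : pvNumFields s = (pvCountGo s.toList false : Int) := by
  unfold pvNumFields
  rw [pv_numFields_go s.toList 1 false]
  omega

-- csvSplit never puts a quote character into a field
lemma pv_noquote : ∀ (cs cur : List Char) (inS : Bool), '"' ∉ cur →
    ∀ f ∈ pvSplitGo cs cur inS, '"' ∉ f := by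
  intro cs
  induction cs with
  | nil => intro cur inS hcur f hf; simp [pvSplitGo] at hf; subst hf; exact hcur
  | cons c cs ih =>
    intro cur inS hcur f hf
    by_cases h1 : c = '"'
    · rw [pvSplitGo, if_pos h1] at hf; exact ih cur _ hcur f hf
    · by_cases h2 : c = ',' ∧ inS = false
      · rw [pvSplitGo, if_neg h1, if_pos h2] at hf
        rcases List.mem_cons.mp hf with hf | hf
        · subst hf; exact hcur
        · exact ih [] _ (by simp) f hf
      · rw [pvSplitGo, if_neg h1, if_neg h2] at hf
        refine ih (cur ++ [c]) _ ?_ f hf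
        simp [hcur, Ne.symm h1]

-- replace.go is the identity when the (single-char) pattern does not occur
lemma pv_replace_go_noop : ∀ (fuel : Nat) (l acc : List Char), '"' ∉ l →
    PySem.Chars.replace.go ['"'] [] fuel l acc = acc.reverse ++ l := by
  intro fuel
  induction fuel with
  | zero => intro l acc _; simp [PySem.Chars.replace.go]
  | succ fuel ih =>
    intro l acc hl
    cases l with
    | nil => simp [PySem.Chars.replace.go]
    | cons c t =>
      rw [PySem.Chars.replace.go]
      have hc : c ≠ '"' := fun hc => hl (by rw [hc]; exact List.mem_cons_self)
      have hpre : List.isPrefixOf ['"'] (c :: t) = false := by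
        simp [List.isPrefixOf]
        exact fun h => hc h.symm
      rw [hpre]
      simp only [Bool.false_eq_true, if_false]
      rw [ih t (c :: acc) (fun h => hl (List.mem_cons_of_mem _ h))]
      simp

lemma pv_clean_noop (s : List Char) (h : '"' ∉ s) : pvClean (String.ofList s) = String.ofList s := by
  unfold pvClean
  simp only [List.foldl]
  have : (PySem.Str.replace (String.ofList s) "\"" "").toList = s := by
    rw [PySem.Str.toList_replace]
    show PySem.Chars.replace (String.ofList s).toList ['"'] [] = s
    unfold PySem.Chars.replace
    simp only [List.isEmpty_cons, Bool.false_eq_true, if_false]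
    have hs : (String.ofList s).toList = s := by simp
    rw [hs, pv_replace_go_noop _ s [] h]
    simp
  exact String.toList_inj.mp (by rw [this]; simp)

-- the field at absolute index idx of csvSplit's list is exactly what pass 2 collects
lemma pv_pick_get : ∀ (cs cur : List Char) (inS : Bool) (k idx : Nat), k ≤ idx →
    idx - k < (pvSplitGo cs cur inS).length →
    (pvSplitGo cs cur inS)[idx - k]? =
      some ((if k = idx then cur else []) ++ pvPickGo cs inS k idx) := by
  intro cs
  induction cs with
  | nil =>
    intro cur inS k idx hk hlen
    simp [pvSplitGo] at hlen ⊢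
    have : idx = k := by omega
    simp [this, pvPickGo]
  | cons c cs ih =>
    intro cur inS k idx hk hlen
    by_cases h1 : c = '"'
    · rw [pvSplitGo, if_pos h1] at hlen ⊢
      rw [pvPickGo, if_pos h1]
      exact ih cur (!inS) k idx hk hlen
    · by_cases h2 : c = ',' ∧ inS = false
      · rw [pvSplitGo, if_neg h1, if_pos h2] at hlen ⊢
        rw [pvPickGo, if_neg h1, if_pos h2]
        by_cases hke : k = idx
        · subst hke
          simp
        · have hklt : k < idx := lt_of_le_of_ne hk hke
          have hsub : idx - k = (idx - (k + 1)) + 1 := by omega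
          rw [hsub]
          simp only [List.getElem?_cons_succ]
          have := ih [] inS (k + 1) idx (by omega) (by simp at hlen; omega)
          rw [this]
          have hnotlt : ¬ idx < k + 1 := by omega
          simp [hke, hnotlt]
      · rw [pvSplitGo, if_neg h1, if_neg h2] at hlen ⊢
        rw [pvPickGo, if_neg h1, if_neg h2]
        have := ih (cur ++ [c]) inS k idx hk hlen
        rw [this]
        by_cases hke : k = idx
        · simp [hke]
        · simp [hke]

-- pick at top level: the j-th field of csvSplit
lemma pv_pick_top (t : List Char) (j : Nat) (h : j < (pvSplitGo t [] false).length) :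
    (pvSplitGo t [] false)[j]? = some (pvPickGo t false 0 j) := by
  have := pv_pick_get t [] false 0 j (Nat.zero_le j) (by simpa using h)
  simpa using this

-- one line: A's field-list lookup branch agrees with B's two-pass branch
lemma pv_line (t : String) (n : Int) :
    (∀ f, PySem.List.pyGet? (pvSplitGo t.toList [] false) n = some f →
      (0 ≤ (if n < 0 then n + (pvCountGo t.toList false : Int) else n) ∧
        (if n < 0 then n + (pvCountGo t.toList false : Int) else n) < (pvCountGo t.toList false : Int)) ∧
      pvClean (String.ofList f) =
        String.ofList (pvPickGo t.toList false 0 (if n < 0 then n + (pvCountGo t.toList false : Int) else n).toNat)) ∧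
    (PySem.List.pyGet? (pvSplitGo t.toList [] false) n = none →
      ¬ (0 ≤ (if n < 0 then n + (pvCountGo t.toList false : Int) else n) ∧
        (if n < 0 then n + (pvCountGo t.toList false : Int) else n) < (pvCountGo t.toList false : Int))) := by
  have hlen := pv_count_eq_length t.toList [] false
  have hlenI : ((pvSplitGo t.toList [] false).length : Int) = (pvCountGo t.toList false : Int) := by
    rw [hlen]
  constructor
  · intro f hf
    have hnq : '"' ∉ f :=
      pv_noquote t.toList [] false (by simp) f (PySem.List.mem_of_pyGet?_eq_some _ hf)
    have hin : PySem.Raise.InRange (pvSplitGo t.toList [] false).length n := by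
      by_contra hcon
      rw [← PySem.List.pyGet?_eq_none_iff] at hcon
      rw [hf] at hcon
      simp at hcon
    obtain ⟨hlo, hhi⟩ := hin
    by_cases hn : n < 0
    · simp only [if_pos hn]
      refine ⟨⟨by omega, by omega⟩, ?_⟩
      have hk1 : 0 < (-n).toNat := by omega
      have hk2 : (-n).toNat ≤ (pvSplitGo t.toList [] false).length := by omega
      have hgn := PySem.List.pyGet?_neg_natCast (pvSplitGo t.toList [] false) (-n).toNat hk1 hk2
      rw [Int.toNat_of_nonneg (by omega : (0:Int) ≤ -n)] at hgn
      simp only [neg_neg] at hgn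
      rw [hgn] at hf
      have hj : (n + (pvCountGo t.toList false : Int)).toNat
          = (pvSplitGo t.toList [] false).length - (-n).toNat := by omega
      have htop := pv_pick_top t.toList ((pvSplitGo t.toList [] false).length - (-n).toNat) (by omega)
      rw [htop] at hf
      have hfv : f = pvPickGo t.toList false 0 ((pvSplitGo t.toList [] false).length - (-n).toNat) :=
        (Option.some.inj hf).symm
      rw [hfv, hj]
      exact pv_clean_noop _ (hfv ▸ hnq)
    · simp only [if_neg hn]
      refine ⟨⟨by omega, by omega⟩, ?_⟩
      rw [PySem.List.pyGet?_of_nonneg _ (by omega : (0:Int) ≤ n)] at hf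
      have htop := pv_pick_top t.toList n.toNat (by omega)
      rw [htop] at hf
      have hfv : f = pvPickGo t.toList false 0 n.toNat := (Option.some.inj hf).symm
      rw [hfv]
      exact pv_clean_noop _ (hfv ▸ hnq)
  · intro hnone hcon
    rw [PySem.List.pyGet?_eq_none_iff] at hnone
    apply hnone
    by_cases hn : n < 0
    · rw [if_pos hn] at hcon; exact ⟨by omega, by omega⟩
    · rw [if_neg hn] at hcon; exact ⟨by omega, by omega⟩

-- A raises exactly where B's range test fails (used to carry Pre_ through the recursion)
theorem pv_main : ∀ (texts : List String) (n : Int) (safe : Bool),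
    Pre_csvColumn texts n safe → csvColumn texts n safe = csvColumn_alt texts n safe := by
  intro texts
  induction texts with
  | nil => intro n safe _; rfl
  | cons t ts ih =>
    intro n safe hpre
    have hpre' : Pre_csvColumn ts n safe := by
      rcases hpre with h | h
      · exact Or.inl h
      · exact Or.inr (fun x hx => h x (List.mem_cons_of_mem _ hx))
    have hline := pv_line t n
    cases hg : PySem.List.pyGet? (pvSplitGo t.toList [] false) n with
    | some f =>
      obtain ⟨hrange, hval⟩ := hline.1 f hg
      simp only [csvColumn, csvColumn_alt, hg]
      rw [if_pos hrange, hval, ih n safe hpre']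
    | none =>
      have hnr := hline.2 hg
      simp only [csvColumn, csvColumn_alt, hg]
      rw [if_neg hnr]
      rcases hpre with hsafe | hall
      · subst hsafe
        rw [ih n true hpre']
      · exfalso
        have := hall t List.mem_cons_self
        rw [pv_numFields_eq] at this
        apply hnr
        by_cases hn : n < 0
        · constructor <;> (rw [if_pos hn]; omega)
        · constructor <;> (rw [if_neg hn]; omega)

-- ===== VERDICT (by name: the statement is the Claim_ definition above) =====
theorem csvColumn_spec : Claim_equal_csvColumn := by
  intro texts n safe _ hpre
  unfold Spec_csvColumn
  exact pv_main texts n safe hpre
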